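-- pv_equiv track=rewrite | github.com/chboishabba/SensibLaw | src/wiki_timeline/numeric_projection.py | _parse_numeric_value_token
-- ===== SOURCE A (Python) =====
-- from typing import Any
--
-- def _parse_numeric_value_token(raw: Any) -> str:
--     compact = str(raw or "").strip().replace(",", "")
--     if not compact:
--         return ""
--
--     i = 0
--     sign = ""
--     if compact[0] in {"+", "-"}:
--         sign = compact[0]
--         i = 1
--
--     seen_digit = False
--     seen_dot = False
--     int_part = ""
--     frac_part = ""
--
--     while i < len(compact):
--         ch = compact[i]
--         if "0" <= ch <= "9":
--             seen_digit = True
--             if seen_dot: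
--                 frac_part += ch
--             else:
--                 int_part += ch
--             i += 1
--             continue
--         if ch == "." and not seen_dot:
--             seen_dot = True
--             i += 1
--             continue
--         return ""
--     if not seen_digit:
--         return ""
--
--     while len(int_part) > 1 and int_part.startswith("0"):
--         int_part = int_part[1:]
--     while frac_part.endswith("0"):
--         frac_part = frac_part[:-1]
--
--     value = f"{int_part}.{frac_part}" if frac_part else int_part
--     if value == "0":
--         sign = ""
--     if sign == "-":
--         value = f"-{value}"
--     return value
-- ===== SOURCE B (Python) =====
-- def _parse_numeric_value_token(raw):
--     compact = str(raw or "").strip().replace(",", "")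
--     if not compact:
--         return ""
--     sign = ""
--     body = compact
--     if body[0] in "+-":
--         sign = body[0]
--         body = body[1:]
--     parts = body.split(".")
--     if len(parts) > 2:
--         return ""
--     if any(not ("0" <= c <= "9") for p in parts for c in p):
--         return ""
--     if all(p == "" for p in parts):
--         return ""
--     int_part = parts[0].lstrip("0") or ("0" if parts[0] else "")
--     frac_part = (parts[1] if len(parts) == 2 else "").rstrip("0")
--     value = int_part + "." + frac_part if frac_part else int_part
--     if value == "0":
--         sign = ""
--     return "-" + value if sign == "-" else value
-- ===== Notes on version B (the rewrite author's own statement) =====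
-- stated objective: simpler
-- what changed: Replaces A's single stateful character scanner (seen_digit/seen_dot flags with incremental int/frac accumulation) and its two zero-stripping while-loops by splitting the body on the dot separator, validating each part's digits, and normalizing with lstrip/rstrip.
import Mathlib
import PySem

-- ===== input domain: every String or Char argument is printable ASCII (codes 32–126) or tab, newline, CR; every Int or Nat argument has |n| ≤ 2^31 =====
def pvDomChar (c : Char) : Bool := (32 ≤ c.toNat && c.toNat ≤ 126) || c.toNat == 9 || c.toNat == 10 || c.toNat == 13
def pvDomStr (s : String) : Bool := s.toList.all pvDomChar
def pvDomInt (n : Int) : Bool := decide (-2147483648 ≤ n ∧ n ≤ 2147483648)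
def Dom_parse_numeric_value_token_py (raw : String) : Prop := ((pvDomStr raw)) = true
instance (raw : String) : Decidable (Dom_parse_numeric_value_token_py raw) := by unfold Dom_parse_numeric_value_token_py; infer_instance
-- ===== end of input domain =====

-- B replaces A's hand-written character scanner by split-on-'.' with per-part digit
-- validation and lstrip/rstrip normalization: a simpler decomposition, same values everywhere.

-- ===== PORT A =====
-- A's while-loop over the characters: state (seen_digit, seen_dot, int_part, frac_part);
-- none = the loop's early `return ""` on a non-digit, non-first-dot character.
def pvALoop : List Char → Bool → Bool → List Char → List Char →
    Option (Bool × List Char × List Char)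
  | [], sd, _, ip, fp => some (sd, ip, fp)
  | ch :: rest, sd, sdot, ip, fp =>
    if '0' ≤ ch ∧ ch ≤ '9' then
      if sdot then pvALoop rest true sdot ip (fp ++ [ch])
      else pvALoop rest true sdot (ip ++ [ch]) fp
    else if ch = '.' ∧ sdot = false then pvALoop rest sd true ip fp
    else none

-- `while len(int_part) > 1 and int_part.startswith("0"): int_part = int_part[1:]`
def pvAStripInt : List Char → List Char
  | [] => []
  | [c] => [c]
  | c :: c2 :: cs => if c = '0' then pvAStripInt (c2 :: cs) else c :: c2 :: cs

-- `while frac_part.endswith("0"): frac_part = frac_part[:-1]`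
def pvAStripFrac (fp : List Char) : List Char :=
  if h : fp.getLast? = some '0' then pvAStripFrac fp.dropLast else fp
termination_by fp.length
decreasing_by
  cases fp with
  | nil => simp at h
  | cons a as => simp

-- A's body after `compact` has been computed (and found nonempty)
def pvACore : List Char → String
  | [] => ""
  | c :: cs =>
    let sign : List Char := if c = '+' ∨ c = '-' then [c] else []
    let body : List Char := if c = '+' ∨ c = '-' then cs else c :: cs
    match pvALoop body false false [] [] with
    | none => ""
    | some (sd, ip, fp) =>
      if sd = false then ""
      else
        let ip := pvAStripInt ip
        let fp := pvAStripFrac fp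
        let value := if fp ≠ [] then ip ++ '.' :: fp else ip
        let sign := if value = ['0'] then [] else sign
        let value := if sign = ['-'] then '-' :: value else value
        String.ofList value

-- str(raw or "") = raw for a string argument, so compact = raw.strip().replace(",", "")
def parse_numeric_value_token_py (raw : String) : String :=
  pvACore (PySem.Str.replace (PySem.Str.strip raw) "," "").toList

-- ===== PORT B =====
def pvBIsDigit (c : Char) : Bool := decide ('0' ≤ c ∧ c ≤ '9')

-- hand port of body.split("."): exact for a one-character separator
def pvBSplitDot : List Char → List (List Char)
  | [] => [[]]
  | c :: cs =>
    match pvBSplitDot cs with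
    | [] => []          -- unreachable: split never returns []
    | p :: ps => if c = '.' then [] :: p :: ps else (c :: p) :: ps

def pvBCore : List Char → String
  | [] => ""
  | c :: cs =>
    let sign : List Char := if c = '+' ∨ c = '-' then [c] else []
    let body : List Char := if c = '+' ∨ c = '-' then cs else c :: cs
    let parts := pvBSplitDot body
    if parts.length > 2 then ""
    else if parts.any (fun p => p.any (fun ch => !pvBIsDigit ch)) then ""
    else if parts.all (fun p => p.isEmpty) then ""
    else
      let ip0 := parts.headD []
      -- parts[0].lstrip("0") or ("0" if parts[0] else "")
      let stripped := ip0.dropWhile (fun ch => ch == '0')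
      let ip := if stripped ≠ [] then stripped else if ip0 ≠ [] then ['0'] else []
      -- (parts[1] if len(parts) == 2 else "").rstrip("0")
      let fp := ((parts.getD 1 []).reverse.dropWhile (fun ch => ch == '0')).reverse
      let value := if fp ≠ [] then ip ++ '.' :: fp else ip
      let sign := if value = ['0'] then [] else sign
      if sign = ['-'] then String.ofList ('-' :: value) else String.ofList value

def parse_numeric_value_token_py_alt (raw : String) : String :=
  pvBCore (PySem.Str.replace (PySem.Str.strip raw) "," "").toList

-- ===== PRECONDITION & SPEC =====
def Spec_parse_numeric_value_token_py (raw : String) (out : String) : Prop := out = parse_numeric_value_token_py_alt raw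
instance (raw : String) (out : String) : Decidable (Spec_parse_numeric_value_token_py raw out) := by unfold Spec_parse_numeric_value_token_py; infer_instance

-- ===== CLAIM (what is proved, stated in full; the proofs are below) =====
def Claim_equal_parse_numeric_value_token_py : Prop := ∀ (raw : String), Dom_parse_numeric_value_token_py raw → Spec_parse_numeric_value_token_py raw (parse_numeric_value_token_py raw)

-- ===== LEMMAS AND PROOFS =====

theorem pvBSplitDot_ne_nil (cs : List Char) : pvBSplitDot cs ≠ [] := by
  induction cs with
  | nil => simp [pvBSplitDot]
  | cons c cs ih =>
    simp only [pvBSplitDot]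
    cases h : pvBSplitDot cs with
    | nil => exact absurd h ih
    | cons p ps => by_cases hc : c = '.' <;> simp [hc]

theorem pvBSplitDot_singleton (cs : List Char) : ∀ p, pvBSplitDot cs = [p] → p = cs := by
  induction cs with
  | nil => intro p h; simp [pvBSplitDot] at h; simp [h]
  | cons a as ih =>
    intro p h
    simp only [pvBSplitDot] at h
    cases h2 : pvBSplitDot as with
    | nil => exact absurd h2 (pvBSplitDot_ne_nil as)
    | cons p' ps' =>
      rw [h2] at h
      by_cases ha : a = '.'
      · simp [ha] at h
      · simp [ha] at h
        obtain ⟨hp, hps⟩ := h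
        subst hps
        have := ih p' h2
        subst this
        exact hp.symm

theorem pvBSplitDot_multi (cs : List Char) : ∀ p q qs, pvBSplitDot cs = p :: q :: qs →
    ('.' : Char) ∈ cs := by
  induction cs with
  | nil => intro p q qs h; simp [pvBSplitDot] at h
  | cons a as ih =>
    intro p q qs h
    simp only [pvBSplitDot] at h
    cases h2 : pvBSplitDot as with
    | nil => exact absurd h2 (pvBSplitDot_ne_nil as)
    | cons p' ps' =>
      rw [h2] at h
      by_cases ha : a = '.'
      · simp [ha]
      · simp [ha] at h
        obtain ⟨hp, hps⟩ := h
        cases ps' with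
        | nil => simp at hps
        | cons q' qs' =>
          rw [hps] at h2
          exact List.mem_cons_of_mem _ (ih _ _ _ h2)

-- A's scanner after the dot: accepts exactly all-digit remainders
theorem pvALoop_after_dot (cs : List Char) : ∀ sd ip fp,
    pvALoop cs sd true ip fp =
      if cs.all pvBIsDigit then some (sd || !cs.isEmpty, ip, fp ++ cs) else none := by
  induction cs with
  | nil => intro sd ip fp; simp [pvALoop]
  | cons c cs ih =>
    intro sd ip fp
    by_cases hd : '0' ≤ c ∧ c ≤ '9'
    · have hc : pvBIsDigit c = true := by simp [pvBIsDigit, hd]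
      by_cases hall : cs.all pvBIsDigit
      · simp [pvALoop, hd, ih, hc, hall]
      · simp [pvALoop, hd, ih, hc, hall]
    · have hnd : pvBIsDigit c = false := by simpa [pvBIsDigit] using hd
      simp [pvALoop, hd, hnd]

-- the result of A's scanner in terms of B's split of the same characters
def pvLoopSpec (sd : Bool) (ip : List Char) (parts : List (List Char)) :
    Option (Bool × List Char × List Char) :=
  match parts with
  | [p] => if p.all pvBIsDigit then some (sd || !p.isEmpty, ip ++ p, []) else none
  | [p, q] => if p.all pvBIsDigit && q.all pvBIsDigit then
      some (sd || !p.isEmpty || !q.isEmpty, ip ++ p, q) else none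
  | _ => none

theorem pvALoop_eq_split (cs : List Char) : ∀ sd ip,
    pvALoop cs sd false ip [] = pvLoopSpec sd ip (pvBSplitDot cs) := by
  induction cs with
  | nil => intro sd ip; simp [pvALoop, pvBSplitDot, pvLoopSpec]
  | cons c cs ih =>
    intro sd ip
    by_cases hd : '0' ≤ c ∧ c ≤ '9'
    · have hc : pvBIsDigit c = true := by simp [pvBIsDigit, hd]
      have hcd : c ≠ '.' := by rintro rfl; revert hd; decide
      rw [show pvALoop (c :: cs) sd false ip [] = pvALoop cs true false (ip ++ [c]) [] by
        simp [pvALoop, hd], ih]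
      cases h : pvBSplitDot cs with
      | nil => exact absurd h (pvBSplitDot_ne_nil cs)
      | cons p ps =>
        simp only [pvBSplitDot, h, if_neg hcd]
        cases ps with
        | nil => simp [pvLoopSpec, hc]
        | cons q qs =>
          cases qs with
          | nil => simp [pvLoopSpec, hc]
          | cons r rs => simp [pvLoopSpec]
    · have hnd : pvBIsDigit c = false := by simpa [pvBIsDigit] using hd
      by_cases hdot : c = '.'
      · subst hdot
        rw [show pvALoop ('.' :: cs) sd false ip [] = pvALoop cs sd true ip [] by
          simp [pvALoop], pvALoop_after_dot]
        cases h : pvBSplitDot cs with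
        | nil => exact absurd h (pvBSplitDot_ne_nil cs)
        | cons p ps =>
          simp only [pvBSplitDot, h]
          cases ps with
          | nil =>
            have hp := pvBSplitDot_singleton cs p h
            subst hp
            by_cases hall : p.all pvBIsDigit <;> simp [pvLoopSpec, hall]
          | cons q qs =>
            have hdotin := pvBSplitDot_multi cs p q qs h
            have hnall : cs.all pvBIsDigit = false := by
              rw [List.all_eq_false]
              exact ⟨'.', hdotin, by decide⟩
            simp [pvLoopSpec, hnall]
      · rw [show pvALoop (c :: cs) sd false ip [] = none by
          simp [pvALoop, hd, hdot]]
        cases h : pvBSplitDot cs with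
        | nil => exact absurd h (pvBSplitDot_ne_nil cs)
        | cons p ps =>
          simp only [pvBSplitDot, h, if_neg hdot]
          cases ps with
          | nil => simp [pvLoopSpec, hnd]
          | cons q qs =>
            cases qs with
            | nil => simp [pvLoopSpec, hnd]
            | cons r rs => simp [pvLoopSpec]

-- A's leading-zero while-loop = B's lstrip("0")-with-fallback
theorem pvAStripInt_eq (p : List Char) :
    pvAStripInt p =
      (if p.dropWhile (fun ch => ch == '0') ≠ [] then p.dropWhile (fun ch => ch == '0')
       else if p ≠ [] then ['0'] else []) := by
  induction p with
  | nil => simp [pvAStripInt]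
  | cons c cs ih =>
    cases cs with
    | nil =>
      by_cases hc : c = '0'
      · subst hc; simp [pvAStripInt, List.dropWhile]
      · have hb : (c == '0') = false := by simpa using hc
        simp [pvAStripInt, List.dropWhile, hb]
    | cons c2 cs2 =>
      by_cases hc : c = '0'
      · subst hc
        simp only [pvAStripInt, ih]
        simp [List.dropWhile]
      · have hb : (c == '0') = false := by simpa using hc
        simp [pvAStripInt, hc, List.dropWhile, hb]

theorem pvAStripFrac_rev (r : List Char) :
    pvAStripFrac r.reverse = (r.dropWhile (fun ch => ch == '0')).reverse := by
  induction r with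
  | nil => rw [pvAStripFrac]; simp
  | cons c cs ih =>
    rw [List.reverse_cons, pvAStripFrac]
    by_cases hc : c = '0'
    · subst hc
      rw [dif_pos (by simp), List.dropLast_concat, ih]
      simp [List.dropWhile]
    · have hb : (c == '0') = false := by simpa using hc
      rw [dif_neg (by simp [hc])]
      simp [List.dropWhile, hb]

theorem pvAStripFrac_eq (q : List Char) :
    pvAStripFrac q = (q.reverse.dropWhile (fun ch => ch == '0')).reverse := by
  have := pvAStripFrac_rev q.reverse
  simpa using this

theorem pvAStripFrac_nil : pvAStripFrac [] = [] := by rw [pvAStripFrac]; simp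

theorem pvAllNotAny (p : List Char) (h : p.all pvBIsDigit = true) :
    (p.any fun ch => !pvBIsDigit ch) = false := by
  rw [List.any_eq_false]
  intro x hx
  rw [List.all_eq_true] at h
  simp [h x hx]

theorem pvNotAllAny (p : List Char) (h : ¬ p.all pvBIsDigit = true) :
    (p.any fun ch => !pvBIsDigit ch) = true := by
  have h' : p.all pvBIsDigit = false := Bool.eq_false_iff.mpr h
  rw [List.all_eq_false] at h'
  obtain ⟨x, hx, hnx⟩ := h'
  rw [List.any_eq_true]
  exact ⟨x, hx, by simp [hnx]⟩

theorem pvCore_eq (cs : List Char) : pvACore cs = pvBCore cs := by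
  cases cs with
  | nil => rfl
  | cons c cs =>
    simp only [pvACore, pvBCore, pvALoop_eq_split]
    cases h : pvBSplitDot (if c = '+' ∨ c = '-' then cs else c :: cs) with
    | nil => exact absurd h (pvBSplitDot_ne_nil _)
    | cons p ps =>
      cases ps with
      | nil =>
        by_cases hall : p.all pvBIsDigit
        · by_cases hp : p.isEmpty
          · obtain rfl : p = [] := by simpa using hp
            simp [pvLoopSpec]
          · simp [pvLoopSpec, hall, hp, pvAllNotAny p hall,
              pvAStripFrac_nil, pvAStripInt_eq]
            split_ifs <;> rfl
        · simp [pvLoopSpec, hall, pvNotAllAny p hall]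
      | cons q qs =>
        cases qs with
        | nil =>
          by_cases hallp : p.all pvBIsDigit
          · by_cases hallq : q.all pvBIsDigit
            · by_cases hp : p.isEmpty
              · by_cases hq : q.isEmpty
                · obtain rfl : p = [] := by simpa using hp
                  obtain rfl : q = [] := by simpa using hq
                  simp [pvLoopSpec]
                · simp [pvLoopSpec, hallp, hallq, hp, hq,
                    pvAllNotAny p hallp, pvAllNotAny q hallq,
                    pvAStripFrac_eq, pvAStripInt_eq]
                  split_ifs <;> rfl
              · simp [pvLoopSpec, hallp, hallq, hp,
                  pvAllNotAny p hallp, pvAllNotAny q hallq,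
                  pvAStripFrac_eq, pvAStripInt_eq]
                split_ifs <;> rfl
            · simp [pvLoopSpec, hallq, pvNotAllAny q hallq]
          · simp [pvLoopSpec, hallp, pvNotAllAny p hallp]
        | cons r rs => simp [pvLoopSpec]

-- ===== VERDICT (by name: the statement is the Claim_ definition above) =====
theorem parse_numeric_value_token_py_spec : Claim_equal_parse_numeric_value_token_py := by
  intro raw _
  unfold Spec_parse_numeric_value_token_py parse_numeric_value_token_py parse_numeric_value_token_py_alt
  exact pvCore_eq _
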